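-- pv_equiv track=rewrite | github.com/MrBrantCode/unitest_baseline | mut_generate/mist_train_taco/taco_5813/solution.py | calculate_triplet_sum
-- ===== SOURCE A (Python) =====
-- def calculate_triplet_sum(A, B, C, mod_value=1000000007):
--     A.sort()
--     B.sort()
--     C.sort()
--
--     x_sum = []
--     z_sum = []
--
--     if B[-1] < A[0] or B[-1] < C[0]:
--         return 0
--
--     count = 0
--     for x in A:
--         count += x
--         x_sum.append(count)
--
--     count = 0
--     for z in C:
--         count += z
--         z_sum.append(count)
--
--     y_counter = 0
--     x_counter = 0
--     z_counter = 0
--     triplet_sum = 0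
--
--     while y_counter < len(B):
--         while x_counter < len(A) and A[x_counter] <= B[y_counter]:
--             x_counter += 1
--         while z_counter < len(C) and C[z_counter] <= B[y_counter]:
--             z_counter += 1
--
--         if x_counter == 0 or z_counter == 0:
--             y_counter += 1
--             continue
--
--         a = (x_sum[x_counter - 1] + x_counter * B[y_counter]) % mod_value
--         b = (z_sum[z_counter - 1] + z_counter * B[y_counter]) % mod_value
--         triplet_sum += a * b
--         y_counter += 1
--
--     return triplet_sum % mod_value
-- ===== SOURCE B (Python) =====
-- def calculate_triplet_sum(A, B, C, mod_value=1000000007):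
--     A.sort()
--     B.sort()
--     C.sort()
--
--     def count_le(L, y):
--         # rightmost insertion point for y in sorted L = number of elements <= y
--         lo, hi = 0, len(L)
--         while lo < hi:
--             mid = (lo + hi) // 2
--             if L[mid] <= y:
--                 lo = mid + 1
--             else:
--                 hi = mid
--         return lo
--
--     def prefix_sums(L):
--         ps = []
--         for v in L:
--             ps.append((ps[-1] if ps else 0) + v)
--         return ps
--
--     px = prefix_sums(A)
--     pz = prefix_sums(C)
--
--     total = 0
--     for y in B:
--         i = count_le(A, y)
--         k = count_le(C, y)
--         if i and k:
--             total += (px[i - 1] + i * y) % mod_value * ((pz[k - 1] + k * y) % mod_value)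
--     return total % mod_value
-- ===== Notes on version B (the rewrite author's own statement) =====
-- stated objective: alternative
-- what changed: Replaces A's shared monotone two-pointer scan (and its special-case early return on max(B)<min(A) or min(C)) with an independent hand-written binary search (bisect_right) per median y over sorted A and C, folding directly over B.
-- outside the precondition, e.g. on calculate_triplet_sum([5], [1], [5], 0): A returns 0, B raises ZeroDivisionError
import Mathlib
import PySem

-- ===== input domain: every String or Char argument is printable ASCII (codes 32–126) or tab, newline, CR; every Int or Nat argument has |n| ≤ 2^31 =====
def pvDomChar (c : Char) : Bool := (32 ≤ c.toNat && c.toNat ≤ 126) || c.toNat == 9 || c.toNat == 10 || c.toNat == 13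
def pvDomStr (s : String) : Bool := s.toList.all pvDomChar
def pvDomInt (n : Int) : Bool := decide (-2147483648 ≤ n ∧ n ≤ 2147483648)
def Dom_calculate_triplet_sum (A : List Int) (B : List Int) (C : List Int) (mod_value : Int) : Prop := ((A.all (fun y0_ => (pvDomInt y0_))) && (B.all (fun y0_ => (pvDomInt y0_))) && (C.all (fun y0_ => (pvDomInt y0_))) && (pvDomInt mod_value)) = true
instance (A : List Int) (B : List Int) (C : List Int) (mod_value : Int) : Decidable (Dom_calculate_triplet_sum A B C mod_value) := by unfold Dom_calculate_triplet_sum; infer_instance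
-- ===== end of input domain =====

-- B replaces A's shared monotone two-pointer scan (and its early-return special case) with an
-- independent hand-written binary search per median y; alternative algorithm, similar cost.
-- Both A and B sort the three argument lists IN PLACE in Python; the equivalence proved here is
-- about the RETURN value only.

-- ===== PORT A =====

-- x_sum/z_sum prefix-sum loop of A ('count += x; x_sum.append(count)')
def pvPrefixA (L : List Int) : List Int :=
  (L.foldl (fun (st : Int × List Int) x => (st.1 + x, st.2 ++ [st.1 + x])) (0, [])).2

-- inner 'while x_counter < len(A) and A[x_counter] <= B[y_counter]: x_counter += 1'
-- (the index read is guarded by k < L.length, so getD is exact here; the extra Nat argument is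
-- only a structural bound on the remaining iterations — started at L.length - k it never runs out)
def pvAdvanceGo (L : List Int) (y : Int) : Nat → Nat → Nat
  | k, 0 => k
  | k, fuel + 1 => if k < L.length ∧ L.getD k 0 ≤ y then pvAdvanceGo L y (k + 1) fuel else k

def pvAdvance (L : List Int) (y : Int) (k : Nat) : Nat :=
  pvAdvanceGo L y k (L.length - k)

-- outer 'while y_counter < len(B)' loop, iterating over sorted B with carried counters
-- (all list reads are in range under the loop's guards, so getD is exact)
def pvLoopA (A' C' xs zs : List Int) (m : Int) : List Int → Nat → Nat → Int → Int
  | [], _, _, acc => acc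
  | y :: rest, xc, zc, acc =>
    let xc' := pvAdvance A' y xc
    let zc' := pvAdvance C' y zc
    if xc' = 0 ∨ zc' = 0 then pvLoopA A' C' xs zs m rest xc' zc' acc
    else
      pvLoopA A' C' xs zs m rest xc' zc'
        (acc + PySem.Int.mod (xs.getD (xc' - 1) 0 + (xc' : Int) * y) m *
               PySem.Int.mod (zs.getD (zc' - 1) 0 + (zc' : Int) * y) m)

def calculate_triplet_sum (A : List Int) (B : List Int) (C : List Int) (mod_value : Int) : Int :=
  match PySem.List.pyGet? (PySem.List.sorted B (fun x => x)) (-1),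
        PySem.List.pyGet? (PySem.List.sorted A (fun x => x)) 0,
        PySem.List.pyGet? (PySem.List.sorted C (fun x => x)) 0 with
  | some bl, some a0, some c0 =>
    if bl < a0 ∨ bl < c0 then 0
    else
      PySem.Int.mod
        (pvLoopA (PySem.List.sorted A (fun x => x)) (PySem.List.sorted C (fun x => x))
          (pvPrefixA (PySem.List.sorted A (fun x => x))) (pvPrefixA (PySem.List.sorted C (fun x => x)))
          mod_value (PySem.List.sorted B (fun x => x)) 0 0 0) mod_value
  | _, _, _ => 0  -- Python raises IndexError here (an empty list); excluded by Pre_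

-- ===== PORT B =====

-- prefix_sums of Source B: 'ps.append((ps[-1] if ps else 0) + v)'
def pvPrefixB (L : List Int) : List Int :=
  L.foldl (fun ps v => ps ++ [ps.getLast?.getD 0 + v]) []

-- count_le of Source B: hand-written bisect_right; '(lo+hi)//2' on the nonnegative bounds is Nat division
-- (the read L[mid] is guarded by lo ≤ mid < hi ≤ len(L), so getD is exact; the extra Nat argument
-- is only a structural bound on the remaining iterations — started at hi - lo it never runs out)
def pvCountLeGo (L : List Int) (y : Int) : Nat → Nat → Nat → Nat
  | lo, _, 0 => lo
  | lo, hi, fuel + 1 =>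
    if lo < hi then
      if L.getD ((lo + hi) / 2) 0 ≤ y then pvCountLeGo L y ((lo + hi) / 2 + 1) hi fuel
      else pvCountLeGo L y lo ((lo + hi) / 2) fuel
    else lo

def pvCountLe (L : List Int) (y : Int) (lo hi : Nat) : Nat :=
  pvCountLeGo L y lo hi (hi - lo)

-- body of Source B's 'for y in B' loop
def pvStepB (A' C' px pz : List Int) (m : Int) (total y : Int) : Int :=
  let i := pvCountLe A' y 0 A'.length
  let k := pvCountLe C' y 0 C'.length
  if i ≠ 0 ∧ k ≠ 0 then
    total + PySem.Int.mod (px.getD (i - 1) 0 + (i : Int) * y) m *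
            PySem.Int.mod (pz.getD (k - 1) 0 + (k : Int) * y) m
  else total

def calculate_triplet_sum_alt (A : List Int) (B : List Int) (C : List Int) (mod_value : Int) : Int :=
  PySem.Int.mod
    ((PySem.List.sorted B (fun x => x)).foldl
      (pvStepB (PySem.List.sorted A (fun x => x)) (PySem.List.sorted C (fun x => x))
        (pvPrefixB (PySem.List.sorted A (fun x => x))) (pvPrefixB (PySem.List.sorted C (fun x => x)))
        mod_value) 0) mod_value

-- ===== PRECONDITION & SPEC =====
-- Pre_ excludes empty lists (A raises IndexError at B[-1]/A[0]/C[0]) and mod_value = 0, where A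
-- raises ZeroDivisionError except when the early max(B) < min(A)-or-min(C) check returns 0 before
-- any modulo, while B always raises ZeroDivisionError there.
def Pre_calculate_triplet_sum (A : List Int) (B : List Int) (C : List Int) (mod_value : Int) : Prop :=
  A ≠ [] ∧ B ≠ [] ∧ C ≠ [] ∧ mod_value ≠ 0
instance (A : List Int) (B : List Int) (C : List Int) (mod_value : Int) : Decidable (Pre_calculate_triplet_sum A B C mod_value) := by unfold Pre_calculate_triplet_sum; infer_instance

def pvWitness_calculate_triplet_sum : List Int × List Int × List Int × Int := ([1], [2], [3], 5)

def Spec_calculate_triplet_sum (A : List Int) (B : List Int) (C : List Int) (mod_value : Int) (out : Int) : Prop := out = calculate_triplet_sum_alt A B C mod_value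
instance (A : List Int) (B : List Int) (C : List Int) (mod_value : Int) (out : Int) : Decidable (Spec_calculate_triplet_sum A B C mod_value out) := by unfold Spec_calculate_triplet_sum; infer_instance

-- ===== CLAIM (what is proved, stated in full; the proofs are below) =====
def Claim_equal_calculate_triplet_sum : Prop := ∀ (A : List Int) (B : List Int) (C : List Int) (mod_value : Int), Dom_calculate_triplet_sum A B C mod_value → Pre_calculate_triplet_sum A B C mod_value → Spec_calculate_triplet_sum A B C mod_value (calculate_triplet_sum A B C mod_value)

-- ===== LEMMAS AND PROOFS =====

-- the number of elements ≤ y; on a sorted list this is what both the two-pointer advance and the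
-- binary search compute
def pvCnt (L : List Int) (y : Int) : Nat := L.countP (fun a => a ≤ y)

lemma pvCnt_le_length (L : List Int) (y : Int) : pvCnt L y ≤ L.length :=
  List.countP_le_length

lemma pvCnt_mono (L : List Int) {y y' : Int} (h : y ≤ y') : pvCnt L y ≤ pvCnt L y' :=
  List.countP_mono_left (fun a _ ha => by simp at ha ⊢; omega)

lemma lt_pvCnt_of_getD_le (L : List Int) (y : Int) (hs : L.Pairwise (· ≤ ·)) :
    ∀ k, k < L.length → L.getD k 0 ≤ y → k < pvCnt L y := by
  induction L with
  | nil => simp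
  | cons x xs ih =>
    rw [List.pairwise_cons] at hs
    intro k hk hle
    cases k with
    | zero =>
      simp only [List.getD_cons_zero] at hle
      simp [pvCnt, hle]
    | succ k =>
      simp only [List.getD_cons_succ] at hle
      simp only [List.length_cons, Nat.succ_lt_succ_iff] at hk
      have hx : x ≤ y := by
        have hmem : xs.getD k 0 ∈ xs := by
          rw [List.getD_eq_getElem xs 0 hk]; exact List.getElem_mem hk
        exact le_trans (hs.1 _ hmem) hle
      have := ih hs.2 k hk hle
      simp [pvCnt, hx] at this ⊢
      omega
  
lemma pvCnt_le_of_not_getD_le (L : List Int) (y : Int) (hs : L.Pairwise (· ≤ ·)) :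
    ∀ k, k < L.length → ¬ (L.getD k 0 ≤ y) → pvCnt L y ≤ k := by
  induction L with
  | nil => simp
  | cons x xs ih =>
    rw [List.pairwise_cons] at hs
    intro k hk hgt
    cases k with
    | zero =>
      simp only [List.getD_cons_zero] at hgt
      have : pvCnt (x :: xs) y = 0 := by
        simp only [pvCnt, List.countP_eq_zero]
        intro a ha
        simp only [List.mem_cons] at ha
        rcases ha with rfl | ha
        · simpa using hgt
        · have := hs.1 a ha; simp; omega
      omega
    | succ k =>
      simp only [List.getD_cons_succ] at hgt
      simp only [List.length_cons, Nat.succ_lt_succ_iff] at hk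
      have := ih hs.2 k hk hgt
      by_cases hx : x ≤ y <;> simp [pvCnt, hx] at this ⊢ <;> omega

lemma pvAdvanceGo_eq (L : List Int) (y : Int) (hs : L.Pairwise (· ≤ ·)) :
    ∀ fuel k, k ≤ pvCnt L y → pvCnt L y ≤ k + fuel → pvAdvanceGo L y k fuel = pvCnt L y := by
  intro fuel
  induction fuel with
  | zero => intro k h1 h2; simp only [pvAdvanceGo]; omega
  | succ fuel ih =>
    intro k h1 h2
    simp only [pvAdvanceGo]
    split
    · next h =>
      have hlt : k < pvCnt L y := lt_pvCnt_of_getD_le L y hs k h.1 h.2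
      exact ih (k + 1) hlt (by omega)
    · next h =>
      rcases Nat.lt_or_ge k L.length with hkl | hkl
      · have hngt : ¬ L.getD k 0 ≤ y := fun hle => h ⟨hkl, hle⟩
        have := pvCnt_le_of_not_getD_le L y hs k hkl hngt
        omega
      · have := pvCnt_le_length L y
        omega

lemma pvAdvance_eq (L : List Int) (y : Int) (hs : L.Pairwise (· ≤ ·)) :
    ∀ k, k ≤ pvCnt L y → pvAdvance L y k = pvCnt L y := by
  intro k hk
  have := pvCnt_le_length L y
  exact pvAdvanceGo_eq L y hs (L.length - k) k hk (by omega)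

lemma pvCountLeGo_eq (L : List Int) (y : Int) (hs : L.Pairwise (· ≤ ·)) :
    ∀ fuel lo hi, lo ≤ pvCnt L y → pvCnt L y ≤ hi → hi ≤ L.length → hi - lo ≤ fuel →
      pvCountLeGo L y lo hi fuel = pvCnt L y := by
  intro fuel
  induction fuel with
  | zero => intro lo hi h1 h2 _ hf; simp only [pvCountLeGo]; omega
  | succ fuel ih =>
    intro lo hi h1 h2 h3 hf
    simp only [pvCountLeGo]
    split
    · next hlt =>
      have hmid1 : lo ≤ (lo + hi) / 2 := by omega
      have hmid2 : (lo + hi) / 2 < hi := by omega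
      split
      · next hle =>
        have := lt_pvCnt_of_getD_le L y hs ((lo + hi) / 2) (by omega) hle
        exact ih ((lo + hi) / 2 + 1) hi (by omega) h2 h3 (by omega)
      · next hgt =>
        have := pvCnt_le_of_not_getD_le L y hs ((lo + hi) / 2) (by omega) hgt
        exact ih lo ((lo + hi) / 2) h1 (by omega) (by omega) (by omega)
    · next hge => omega

lemma pvCountLe_eq (L : List Int) (y : Int) (hs : L.Pairwise (· ≤ ·)) :
    ∀ lo hi, lo ≤ pvCnt L y → pvCnt L y ≤ hi → hi ≤ L.length → pvCountLe L y lo hi = pvCnt L y := by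
  intro lo hi h1 h2 h3
  exact pvCountLeGo_eq L y hs (hi - lo) lo hi h1 h2 h3 (le_refl _)

lemma pvPrefix_aux (L : List Int) :
    ∀ (s : Int) (ps : List Int), ps.getLast?.getD 0 = s →
      (L.foldl (fun (st : Int × List Int) x => (st.1 + x, st.2 ++ [st.1 + x])) (s, ps)).2 =
        L.foldl (fun ps v => ps ++ [ps.getLast?.getD 0 + v]) ps := by
  induction L with
  | nil => intro s ps _; rfl
  | cons x xs ih =>
    intro s ps hlast
    simp only [List.foldl_cons, hlast]
    exact ih (s + x) (ps ++ [s + x]) (by simp)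

lemma pvPrefix_eq (L : List Int) : pvPrefixB L = pvPrefixA L := by
  unfold pvPrefixA pvPrefixB
  exact (pvPrefix_aux L 0 [] (by simp)).symm

lemma pairwise_le_getLast (L : List Int) (hs : L.Pairwise (· ≤ ·)) (h : L ≠ []) :
    ∀ y ∈ L, y ≤ L.getLast h := by
  induction L with
  | nil => simp at h
  | cons x xs ih =>
    rw [List.pairwise_cons] at hs
    intro y hy
    rcases List.mem_cons.mp hy with rfl | hy
    · cases xs with
      | nil => simp [List.getLast]
      | cons z zs =>
        rw [List.getLast_cons (by simp)]
        exact le_trans (hs.1 _ (List.getLast_mem _)) (le_refl _)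
    · cases xs with
      | nil => simp at hy
      | cons z zs =>
        rw [List.getLast_cons (by simp)]
        exact ih hs.2 (by simp) y hy

lemma pvLoopA_eq (A' C' xs zs : List Int) (m : Int)
    (hA : A'.Pairwise (· ≤ ·)) (hC : C'.Pairwise (· ≤ ·)) :
    ∀ (Bs : List Int) (xc zc : Nat) (acc : Int), Bs.Pairwise (· ≤ ·) →
      (∀ y ∈ Bs, xc ≤ pvCnt A' y) → (∀ y ∈ Bs, zc ≤ pvCnt C' y) →
      pvLoopA A' C' xs zs m Bs xc zc acc = Bs.foldl (pvStepB A' C' xs zs m) acc := by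
  intro Bs
  induction Bs with
  | nil => intro xc zc acc _ _ _; rfl
  | cons y rest ih =>
    intro xc zc acc hBs hx hz
    rw [List.pairwise_cons] at hBs
    have hxc : pvAdvance A' y xc = pvCnt A' y := pvAdvance_eq A' y hA xc (hx y (by simp))
    have hzc : pvAdvance C' y zc = pvCnt C' y := pvAdvance_eq C' y hC zc (hz y (by simp))
    have hi : pvCountLe A' y 0 A'.length = pvCnt A' y :=
      pvCountLe_eq A' y hA 0 A'.length (Nat.zero_le _) (pvCnt_le_length A' y) (le_refl _)
    have hk : pvCountLe C' y 0 C'.length = pvCnt C' y :=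
      pvCountLe_eq C' y hC 0 C'.length (Nat.zero_le _) (pvCnt_le_length C' y) (le_refl _)
    have hxnext : ∀ y' ∈ rest, pvCnt A' y ≤ pvCnt A' y' :=
      fun y' hy' => pvCnt_mono A' (hBs.1 y' hy')
    have hznext : ∀ y' ∈ rest, pvCnt C' y ≤ pvCnt C' y' :=
      fun y' hy' => pvCnt_mono C' (hBs.1 y' hy')
    simp only [pvLoopA, pvStepB, List.foldl_cons, hxc, hzc, hi, hk]
    by_cases h0 : pvCnt A' y = 0 ∨ pvCnt C' y = 0
    · rw [if_pos h0, if_neg (by tauto)]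
      exact ih (pvCnt A' y) (pvCnt C' y) acc hBs.2 hxnext hznext
    · rw [if_neg h0, if_pos (by tauto)]
      exact ih (pvCnt A' y) (pvCnt C' y) _ hBs.2 hxnext hznext

lemma foldl_stepB_skip (A' C' xs zs : List Int) (m : Int) :
    ∀ (Bs : List Int) (acc : Int),
      (∀ y ∈ Bs, pvCountLe A' y 0 A'.length = 0 ∨ pvCountLe C' y 0 C'.length = 0) →
      Bs.foldl (pvStepB A' C' xs zs m) acc = acc := by
  intro Bs
  induction Bs with
  | nil => intro acc _; rfl
  | cons y rest ih =>
    intro acc h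
    simp only [List.foldl_cons, pvStepB]
    rw [if_neg (by have := h y (by simp); tauto)]
    exact ih acc (fun y' hy' => h y' (by simp [hy']))

lemma sorted_pairwise_le (L : List Int) :
    (PySem.List.sorted L (fun x => x)).Pairwise (· ≤ ·) := by
  simpa using PySem.List.sorted_pairwise L (fun x => x)

-- ===== VERDICT (by name: the statement is the Claim_ definition above) =====
theorem calculate_triplet_sum_spec : Claim_equal_calculate_triplet_sum := by
  intro A B C m _ hPre
  obtain ⟨hA, hB, hC, hm⟩ := hPre
  unfold Spec_calculate_triplet_sum calculate_triplet_sum calculate_triplet_sum_alt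
  have hA' := sorted_pairwise_le A
  have hB' := sorted_pairwise_le B
  have hC' := sorted_pairwise_le C
  have hAne : PySem.List.sorted A (fun x => x) ≠ [] := by
    simpa [PySem.List.sorted_eq_nil_iff] using hA
  have hBne : PySem.List.sorted B (fun x => x) ≠ [] := by
    simpa [PySem.List.sorted_eq_nil_iff] using hB
  have hCne : PySem.List.sorted C (fun x => x) ≠ [] := by
    simpa [PySem.List.sorted_eq_nil_iff] using hC
  obtain ⟨a0, As, hAeq⟩ := List.exists_cons_of_ne_nil hAne
  obtain ⟨c0, Cs, hCeq⟩ := List.exists_cons_of_ne_nil hCne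
  rw [PySem.List.pyGet?_neg_one, List.getLast?_eq_some_getLast hBne, hAeq, hCeq,
    PySem.List.pyGet?_zero_cons, PySem.List.pyGet?_zero_cons]
  rw [hAeq] at hA'
  rw [hCeq] at hC'
  split
  · next bl a0' c0' hbl ha0 hc0 =>
    injection hbl with hbl
    injection ha0 with ha0
    injection hc0 with hc0
    subst hbl ha0 hc0
    split
    · next hlt =>
      -- early return: every y in sorted B is below min(A) or below min(C); each step is skipped
      rw [foldl_stepB_skip, (PySem.Int.mod_eq_zero_iff_dvd 0 m).mpr (dvd_zero m)]
      intro y hy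
      have hyle : y ≤ (PySem.List.sorted B (fun x => x)).getLast hBne :=
        pairwise_le_getLast _ hB' hBne y hy
      have hApc := List.pairwise_cons.mp hA'
      have hCpc := List.pairwise_cons.mp hC'
      rcases hlt with hlt | hlt
      · left
        rw [pvCountLe_eq _ y hA' 0 _ (Nat.zero_le _) (pvCnt_le_length _ y) (le_refl _)]
        simp only [pvCnt, List.countP_eq_zero]
        intro a ha
        rcases List.mem_cons.mp ha with rfl | ha
        · simp; omega
        · have := hApc.1 a ha; simp; omega
      · right
        rw [pvCountLe_eq _ y hC' 0 _ (Nat.zero_le _) (pvCnt_le_length _ y) (le_refl _)]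
        simp only [pvCnt, List.countP_eq_zero]
        intro a ha
        rcases List.mem_cons.mp ha with rfl | ha
        · simp; omega
        · have := hCpc.1 a ha; simp; omega
    · next _ =>
      rw [pvPrefix_eq, pvPrefix_eq,
        pvLoopA_eq _ _ _ _ m hA' hC' _ 0 0 0 hB' (fun _ _ => Nat.zero_le _) (fun _ _ => Nat.zero_le _)]
  · next h => exact (h _ _ _ rfl rfl rfl).elim
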